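-- pv_equiv track=rewrite | github.com/neverbeam/DMT | reader.py | programme
-- ===== SOURCE A (Python) =====
-- def programme(value):
--     value = value.lower()
--     course = "Other"
--     for business_string in ["b"]:
--         if business_string in value:
--             course = "BUS"
--     for cs_string in ["cs", "computer"]:
--         if cs_string in value:
--             course = "CS"
--     for cls_string in ["cls", "computational"]:
--         if cls_string in value:
--             course = "CLS"
--     for ai_string in ["ai", "artificial", "intelligence"]:
--         if ai_string in value:
--             course = "AI"
--     for business_string in ["business"]:
--         if business_string in value:
--             course = "BUS"
--     for ba_string in ["ba","business analytics"]:
--         if ba_string in value: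
--             course = "BA"
--     for bio_string in ["bio"]:
--         if bio_string in value:
--             course = "BIO"
--     for math_string in ["math"]:
--         if math_string in value:
--             course = "MATH"
--     for phy_string in ["physics"]:
--         if phy_string in value:
--             course = "PHY"
--     for eco_string in ["econo"]:
--         if eco_string in value:
--             course = "ECO"
--     for phd_string in ["phd"]:
--         if phd_string in value:
--             course = "PhD"
--     return course
-- ===== SOURCE B (Python) =====
-- # One flat priority table; a single left-to-right scan over the text: at each
-- # position try every pattern with startswith and remember the highest-priority
-- # rule index that ever fires (a naive multi-pattern text scanner).
-- RULES = [
--     ("b", "BUS"),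
--     ("cs", "CS"), ("computer", "CS"),
--     ("cls", "CLS"), ("computational", "CLS"),
--     ("ai", "AI"), ("artificial", "AI"), ("intelligence", "AI"),
--     ("business", "BUS"),
--     ("ba", "BA"), ("business analytics", "BA"),
--     ("bio", "BIO"),
--     ("math", "MATH"),
--     ("physics", "PHY"),
--     ("econo", "ECO"),
--     ("phd", "PhD"),
-- ]
--
-- def programme(value):
--     v = value.lower()
--     best = -1
--     for i in range(len(v) + 1):
--         for j, (sub, _) in enumerate(RULES):
--             if v.startswith(sub, i):
--                 best = max(best, j)
--     return RULES[best][1] if best >= 0 else "Other"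
-- ===== Notes on version B (the rewrite author's own statement) =====
-- stated objective: alternative
-- what changed: Replaces A's eleven staged override loops of built-in whole-string substring searches by a single left-to-right scan over the text that tries every pattern with startswith at each position and keeps the maximal rule index, mapping that index to its label at the end.
import Mathlib
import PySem

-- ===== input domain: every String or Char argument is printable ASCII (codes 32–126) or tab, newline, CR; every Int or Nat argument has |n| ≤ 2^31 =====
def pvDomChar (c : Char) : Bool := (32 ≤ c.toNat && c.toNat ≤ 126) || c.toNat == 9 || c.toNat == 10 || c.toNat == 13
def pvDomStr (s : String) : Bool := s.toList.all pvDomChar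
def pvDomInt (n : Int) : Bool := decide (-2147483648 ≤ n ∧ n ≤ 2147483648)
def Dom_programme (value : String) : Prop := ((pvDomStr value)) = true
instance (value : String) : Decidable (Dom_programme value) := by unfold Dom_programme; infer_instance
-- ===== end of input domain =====

-- B replaces A's staged override loops of whole-string substring searches by one left-to-right
-- position scan of the text that tries every pattern with startswith and keeps the maximal rule
-- index (objective: alternative; not claimed faster).

-- ===== PORT A =====
def programme (value : String) : String :=
  let value := PySem.Str.lower value
  let course := "Other"
  let course := ["b"].foldl (fun c s => if PySem.Str.isIn s value then "BUS" else c) course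
  let course := ["cs", "computer"].foldl (fun c s => if PySem.Str.isIn s value then "CS" else c) course
  let course := ["cls", "computational"].foldl (fun c s => if PySem.Str.isIn s value then "CLS" else c) course
  let course := ["ai", "artificial", "intelligence"].foldl (fun c s => if PySem.Str.isIn s value then "AI" else c) course
  let course := ["business"].foldl (fun c s => if PySem.Str.isIn s value then "BUS" else c) course
  let course := ["ba", "business analytics"].foldl (fun c s => if PySem.Str.isIn s value then "BA" else c) course
  let course := ["bio"].foldl (fun c s => if PySem.Str.isIn s value then "BIO" else c) course
  let course := ["math"].foldl (fun c s => if PySem.Str.isIn s value then "MATH" else c) course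
  let course := ["physics"].foldl (fun c s => if PySem.Str.isIn s value then "PHY" else c) course
  let course := ["econo"].foldl (fun c s => if PySem.Str.isIn s value then "ECO" else c) course
  let course := ["phd"].foldl (fun c s => if PySem.Str.isIn s value then "PhD" else c) course
  course

-- ===== PORT B =====
def pvRules : List (String × String) :=
  [("b", "BUS"),
   ("cs", "CS"), ("computer", "CS"),
   ("cls", "CLS"), ("computational", "CLS"),
   ("ai", "AI"), ("artificial", "AI"), ("intelligence", "AI"),
   ("business", "BUS"),
   ("ba", "BA"), ("business analytics", "BA"),
   ("bio", "BIO"),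
   ("math", "MATH"),
   ("physics", "PHY"),
   ("econo", "ECO"),
   ("phd", "PhD")]

-- Python's v.startswith(sub, i) with 0 ≤ i is ported as startswith of the slice v[i:] (exact there).
def programme_alt (value : String) : String :=
  let v := PySem.Str.lower value
  let best :=
    (PySem.List.pyRange 0 (PySem.Str.len v + 1) 1).foldl
      (fun best i =>
        (PySem.List.enumerate pvRules 0).foldl
          (fun b p => if PySem.Str.startswith (PySem.Str.slice v (some i) none) p.2.1 then max b p.1 else b)
          best)
      (-1)
  if best ≥ 0 then (PySem.List.pyGetD pvRules best ("", "")).2 else "Other"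

-- ===== PRECONDITION & SPEC =====
def Spec_programme (value : String) (out : String) : Prop := out = programme_alt value
instance (value : String) (out : String) : Decidable (Spec_programme value out) := by unfold Spec_programme; infer_instance

-- ===== CLAIM (what is proved, stated in full; the proofs are below) =====
def Claim_equal_programme : Prop := ∀ (value : String), Dom_programme value → Spec_programme value (programme value)

-- ===== LEMMAS AND PROOFS =====

-- B's best-index accumulator, on the List Char level, positions 0..|L| from the left.
def pvBestScan (L : List Char) : Int :=
  (List.range (L.length + 1)).foldl
    (fun b k =>
      (PySem.List.enumerate pvRules 0).foldl
        (fun b p => if PySem.Chars.startswith (L.drop k) p.2.1.toList then max b p.1 else b) b)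
    (-1)

-- the rule-table fold with an abstract per-rule condition
def pvRuleFold (c : String × String → Bool) (b : Int) : Int :=
  (PySem.List.enumerate pvRules 0).foldl (fun b p => if c p.2 then max b p.1 else b) b

-- guard-max folds: pulling a max out of the accumulator
theorem pv_foldl_max_out {α : Type} (f : α → Bool) (g : α → Int) (l : List α) :
    ∀ (b x : Int), l.foldl (fun b a => if f a then max b (g a) else b) (max b x)
      = max (l.foldl (fun b a => if f a then max b (g a) else b) b) x := by
  induction l with
  | nil => intro b x; simp
  | cons a l ih =>
      intro b x
      simp only [List.foldl]
      by_cases h : f a = true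
      · simp only [h, if_pos]
        rw [show max (max b x) (g a) = max (max b (g a)) x by omega, ih]
      · simp only [h, if_neg, Bool.false_eq_true, not_false_iff, ih]

-- a guarded max-fold only grows its accumulator
theorem pv_le_fold {α : Type} (f : α → Bool) (g : α → Int) (l : List α) :
    ∀ (b : Int), b ≤ l.foldl (fun b a => if f a then max b (g a) else b) b := by
  induction l with
  | nil => intro b; simp
  | cons a l ih =>
      intro b
      simp only [List.foldl]
      by_cases h : f a = true
      · simp only [h, if_pos]
        exact le_trans (le_max_left _ _) (ih (max b (g a)))
      · simp only [h, Bool.false_eq_true, if_neg, not_false_iff]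
        exact ih b

-- composing two guarded max-folds over the same list is one fold with the disjunction
theorem pv_fold_or {α : Type} (m q : α → Bool) (g : α → Int) (l : List α) :
    ∀ (b : Int),
      l.foldl (fun b a => if q a then max b (g a) else b)
        (l.foldl (fun b a => if m a then max b (g a) else b) b)
      = l.foldl (fun b a => if m a || q a then max b (g a) else b) b := by
  induction l with
  | nil => intro b; rfl
  | cons a l ih =>
      intro b
      simp only [List.foldl]
      by_cases hq : q a = true <;> by_cases hm : m a = true <;>
        simp only [hq, hm, Bool.false_or, Bool.or_false, Bool.or_self,
          Bool.false_eq_true, if_pos, if_neg, not_false_iff]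
      · rw [pv_foldl_max_out q g l _ (g a), ih (max b (g a))]
        exact max_eq_left (le_trans (le_max_right _ _)
          (pv_le_fold (fun a => m a || q a) g l (max b (g a))))
      · rw [pv_foldl_max_out q g l _ (g a), ih b,
          ← pv_foldl_max_out (fun a => m a || q a) g l b (g a)]
      · exact ih (max b (g a))
      · exact ih b

-- pv_fold_or specialized to the enumerated rule table
theorem pv_fold_or' (c1 c2 : Int × (String × String) → Bool)
    (l : List (Int × (String × String))) (b : Int) :
    l.foldl (fun b p => if c2 p then max b p.1 else b)
      (l.foldl (fun b p => if c1 p then max b p.1 else b) b)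
    = l.foldl (fun b p => if c1 p || c2 p then max b p.1 else b) b :=
  pv_fold_or c1 c2 (fun p => p.1) l b

-- the position scan equals the rule fold with the "matched somewhere below i" condition
theorem pvBestScan_upTo (L : List Char) (i : Nat) :
    (List.range i).foldl
      (fun b k =>
        (PySem.List.enumerate pvRules 0).foldl
          (fun b p => if PySem.Chars.startswith (L.drop k) p.2.1.toList then max b p.1 else b) b)
      (-1)
    = pvRuleFold (fun r => (List.range i).any (fun k => PySem.Chars.startswith (L.drop k) r.1.toList)) (-1) := by
  induction i with
  | zero =>
      simp only [List.range_zero, List.foldl_nil, List.any_nil, pvRuleFold, Bool.false_eq_true,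
        if_neg, not_false_iff, List.foldl_fixed]
  | succ i ih =>
      rw [List.range_succ, List.foldl_append, List.foldl_cons, List.foldl_nil, ih]
      simp only [pvRuleFold]
      rw [pv_fold_or' (fun p => (List.range i).any (fun k => PySem.Chars.startswith (L.drop k) p.2.1.toList))
        (fun p => PySem.Chars.startswith (L.drop i) p.2.1.toList)]
      simp only [List.any_append, List.any_cons, List.any_nil, Bool.or_false]

-- bounded positions suffice: matching somewhere ↔ matching at some position ≤ |L|
theorem pv_any_range_eq_isIn (L sub : List Char) :
    (List.range (L.length + 1)).any (fun k => PySem.Chars.startswith (L.drop k) sub)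
      = PySem.Chars.isIn sub L := by
  rw [Bool.eq_iff_iff]
  simp only [List.any_eq_true, List.mem_range, PySem.Chars.startswith_iff]
  rw [← PySem.Chars.exists_prefix_drop_iff_isIn]
  constructor
  · rintro ⟨k, _, hk⟩; exact ⟨k, hk⟩
  · rintro ⟨j, hj⟩
    by_cases h : j ≤ L.length
    · exact ⟨j, by omega, hj⟩
    · refine ⟨L.length, by omega, ?_⟩
      rw [List.drop_length]
      rwa [List.drop_eq_nil_of_le (by omega)] at hj

-- where an enumerate-fold's best index can land
theorem pv_foldEnum_cases (c : String × String → Bool) :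
    ∀ (rs : List (String × String)) (k : Int) (b : Int),
      (PySem.List.enumerate rs k).foldl (fun b p => if c p.2 then max b p.1 else b) b = b ∨
      (k ≤ (PySem.List.enumerate rs k).foldl (fun b p => if c p.2 then max b p.1 else b) b ∧
       (PySem.List.enumerate rs k).foldl (fun b p => if c p.2 then max b p.1 else b) b < k + rs.length) := by
  intro rs
  induction rs with
  | nil => intro k b; left; rfl
  | cons r rs ih =>
      intro k b
      rw [PySem.List.enumerate_cons]
      simp only [List.foldl]
      rcases ih (k + 1) (if c r then max b k else b) with h | h <;>
        [skip; skip] <;> by_cases hc : c r = true <;>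
        simp_all [List.length_cons] <;> omega

def pvEnumFold (c : String × String → Bool) (rs : List (String × String)) (k b : Int) : Int :=
  (PySem.List.enumerate rs k).foldl (fun b p => if c p.2 then max b p.1 else b) b

theorem pv_enumerate_append_singleton (rs : List (String × String)) (r : String × String) :
    ∀ (k : Int), PySem.List.enumerate (rs ++ [r]) k
      = PySem.List.enumerate rs k ++ [(k + rs.length, r)] := by
  induction rs with
  | nil => intro k; simp [PySem.List.enumerate_cons, PySem.List.enumerate_nil]
  | cons x rs ih =>
      intro k
      simp only [List.cons_append, PySem.List.enumerate_cons, ih (k + 1), List.length_cons]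
      push_cast
      ring_nf

-- last-match-wins over the rule table = label of the maximal matching index
theorem pvRuleFold_eq (c : String × String → Bool) (b : Int) :
    pvRuleFold c b = pvEnumFold c pvRules 0 b := rfl

theorem pv_flat_eq_best (c : String × String → Bool) (rs : List (String × String)) :
    rs.foldl (fun acc r => if c r then r.2 else acc) "Other"
      = (if pvEnumFold c rs 0 (-1) ≥ 0
          then (PySem.List.pyGetD rs (pvEnumFold c rs 0 (-1)) ("", "")).2 else "Other") := by
  induction rs using List.reverseRecOn with
  | nil => rfl
  | append_singleton rs r ih =>
      have hstep : pvEnumFold c (rs ++ [r]) 0 (-1)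
          = (if c r then max (pvEnumFold c rs 0 (-1)) (rs.length : Int)
              else pvEnumFold c rs 0 (-1)) := by
        unfold pvEnumFold
        rw [pv_enumerate_append_singleton rs r 0, List.foldl_append, List.foldl_cons,
          List.foldl_nil]
        simp
      have hcases : pvEnumFold c rs 0 (-1) = -1 ∨
          (0 ≤ pvEnumFold c rs 0 (-1) ∧ pvEnumFold c rs 0 (-1) < 0 + rs.length) :=
        pv_foldEnum_cases c rs 0 (-1)
      rw [List.foldl_append, List.foldl_cons, List.foldl_nil, hstep]
      by_cases hc : c r = true
      · simp only [hc, ite_true]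
        have hle : pvEnumFold c rs 0 (-1) ≤ (rs.length : Int) := by omega
        rw [max_eq_right hle, if_pos (by positivity)]
        rw [PySem.List.pyGetD_natCast]
        have hget : (rs ++ [r]).getD rs.length ("", "") = r := by
          simp [List.getD_eq_getElem?_getD]
        rw [hget]
      · simp only [hc, Bool.false_eq_true, if_neg, not_false_iff]
        rcases hcases with h | h
        · rw [ih, h]
          norm_num
        · rw [ih, if_pos (by omega), if_pos (by omega)]
          rw [PySem.List.pyGetD_of_nonneg _ _ (by omega), PySem.List.pyGetD_of_nonneg _ _ (by omega)]
          rw [List.getD_append _ _ _ _ (by omega)]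

-- ===== VERDICT (by name: the statement is the Claim_ definition above) =====
set_option maxHeartbeats 1000000 in
theorem programme_spec : Claim_equal_programme := by
  intro value _
  unfold Spec_programme
  have h1 : programme value
      = pvRules.foldl (fun acc r => if PySem.Str.isIn r.1 (PySem.Str.lower value) then r.2 else acc)
          "Other" := by
    simp only [programme, pvRules, List.foldl_cons, List.foldl_nil]
  have h2 : programme_alt value
      = (if pvBestScan (PySem.Str.lower value).toList ≥ 0
          then (PySem.List.pyGetD pvRules (pvBestScan (PySem.Str.lower value).toList) ("", "")).2
          else "Other") := by
    simp only [programme_alt, pvBestScan]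
    rw [PySem.Str.len_eq,
      show ((PySem.Str.lower value).toList.length : Int) + 1
          = (((PySem.Str.lower value).toList.length + 1 : Nat) : Int) by push_cast; ring,
      PySem.List.pyRange_zero_natCast, List.foldl_map]
    simp only [PySem.Str.startswith_eq, PySem.Str.toList_slice, PySem.Chars.slice_eq_listSlice,
      PySem.List.slice_from_natCast]
  rw [h1, h2]
  have h3 : pvBestScan (PySem.Str.lower value).toList
      = pvRuleFold (fun p => (List.range ((PySem.Str.lower value).toList.length + 1)).any
          (fun k => PySem.Chars.startswith ((PySem.Str.lower value).toList.drop k) p.1.toList))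
          (-1) :=
    pvBestScan_upTo (PySem.Str.lower value).toList ((PySem.Str.lower value).toList.length + 1)
  rw [h3]
  have h4 : (fun p : String × String => (List.range ((PySem.Str.lower value).toList.length + 1)).any
          (fun k => PySem.Chars.startswith ((PySem.Str.lower value).toList.drop k) p.1.toList))
      = (fun r : String × String => PySem.Str.isIn r.1 (PySem.Str.lower value)) := by
    funext p
    rw [pv_any_range_eq_isIn, PySem.Str.isIn_eq]
  rw [h4, pvRuleFold_eq]
  exact pv_flat_eq_best _ pvRules
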